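-- pv_equiv track=rewrite | github.com/Hermi63/vishlistfowwork | backend/app/services/link_preview.py | _wb_image_url
-- ===== SOURCE A (Python) =====
-- def _wb_image_url(nm: int) -> str:
--     """Сформировать URL изображения Wildberries по ID товара."""
--     vol = nm // 100000
--     part = nm // 1000
--     # Маппинг vol -> basket номер (актуально на 2025)
--     basket_ranges = [
--         (143, "01"), (287, "02"), (431, "03"), (719, "04"),
--         (1007, "05"), (1061, "06"), (1115, "07"), (1169, "08"),
--         (1313, "09"), (1601, "10"), (1655, "11"), (1919, "12"),
--         (2045, "13"), (2189, "14"), (2405, "15"), (2621, "16"),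
--         (2837, "17"),
--     ]
--     basket = "18"
--     for threshold, b in basket_ranges:
--         if vol <= threshold:
--             basket = b
--             break
--     return f"https://basket-{basket}.wbbasket.ru/vol{vol}/part{part}/{nm}/images/big/1.webp"
-- ===== SOURCE B (Python) =====
-- _WB_THRESHOLDS = [143, 287, 431, 719, 1007, 1061, 1115, 1169,
--                   1313, 1601, 1655, 1919, 2045, 2189, 2405, 2621, 2837]
--
--
-- def _wb_image_url(nm: int) -> str:
--     """Сформировать URL изображения Wildberries по ID товара."""
--     vol = nm // 100000
--     part = nm // 1000
--     # binary search (bisect_left) for the first threshold >= vol;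
--     # the basket number is one more than that index (the last slot is the overflow basket)
--     lo, hi = 0, len(_WB_THRESHOLDS)
--     while lo < hi:
--         mid = (lo + hi) // 2
--         if _WB_THRESHOLDS[mid] < vol:
--             lo = mid + 1
--         else:
--             hi = mid
--     basket = lo + 1
--     return f"https://basket-{basket:02d}.wbbasket.ru/vol{vol}/part{part}/{nm}/images/big/1.webp"
-- ===== Notes on version B (the rewrite author's own statement) =====
-- stated objective: alternative
-- what changed: Replaces A's linear first-match scan of a labelled (threshold, string) table by a hand-written binary search (bisect_left) over a bare sorted threshold list, computing the basket number as one more than the found index and formatting it arithmetically with 02d instead of looking up a string label.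
import Mathlib
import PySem

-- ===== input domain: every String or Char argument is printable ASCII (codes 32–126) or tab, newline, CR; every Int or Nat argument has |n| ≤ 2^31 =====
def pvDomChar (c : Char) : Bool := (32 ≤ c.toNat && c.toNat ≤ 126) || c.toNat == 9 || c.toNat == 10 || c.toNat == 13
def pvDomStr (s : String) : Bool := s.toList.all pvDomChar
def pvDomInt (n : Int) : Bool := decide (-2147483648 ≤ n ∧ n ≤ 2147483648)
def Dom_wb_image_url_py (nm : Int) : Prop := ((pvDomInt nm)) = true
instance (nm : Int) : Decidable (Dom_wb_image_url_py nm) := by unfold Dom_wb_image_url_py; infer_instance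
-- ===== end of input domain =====

-- B replaces A's linear first-match scan of the labelled basket table by a
-- binary search (bisect_left) over a bare sorted threshold list, with 02d formatting.

-- ===== PORT A =====
def wbRangesA : List (Int × String) :=
  [(143, "01"), (287, "02"), (431, "03"), (719, "04"),
   (1007, "05"), (1061, "06"), (1115, "07"), (1169, "08"),
   (1313, "09"), (1601, "10"), (1655, "11"), (1919, "12"),
   (2045, "13"), (2189, "14"), (2405, "15"), (2621, "16"),
   (2837, "17")]

-- the for-loop with break: first pair with vol ≤ threshold wins, else the initial "18"
def wbScanA (vol : Int) : List (Int × String) → String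
  | [] => "18"
  | (t, b) :: rest => if vol ≤ t then b else wbScanA vol rest

def wb_image_url_py (nm : Int) : String :=
  let vol := PySem.Int.floordiv nm 100000
  let part := PySem.Int.floordiv nm 1000
  let basket := wbScanA vol wbRangesA
  "https://basket-" ++ basket ++ ".wbbasket.ru/vol" ++ PySem.Int.toStr vol ++
    "/part" ++ PySem.Int.toStr part ++ "/" ++ PySem.Int.toStr nm ++ "/images/big/1.webp"

-- ===== PORT B =====
def wbThresholdsB : List Int :=
  [143, 287, 431, 719, 1007, 1061, 1115, 1169, 1313, 1601, 1655, 1919, 2045, 2189, 2405, 2621, 2837]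

-- the while-loop of Source B: bisect_left on the threshold list
def wbBisect (v : Int) (lo hi : Nat) : Nat :=
  if _h : lo < hi then
    let mid := (lo + hi) / 2
    if wbThresholdsB.getD mid 0 < v then wbBisect v (mid + 1) hi else wbBisect v lo mid
  else lo
termination_by hi - lo
decreasing_by all_goals omega

-- f"{n:02d}", exact for 0 ≤ n < 100 (all values reached here are 1..18)
def wbPad2 (n : Int) : String :=
  if n < 10 then "0" ++ PySem.Int.toStr n else PySem.Int.toStr n

def wb_image_url_py_alt (nm : Int) : String :=
  let vol := PySem.Int.floordiv nm 100000
  let part := PySem.Int.floordiv nm 1000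
  let basket : Int := (wbBisect vol 0 wbThresholdsB.length : Int) + 1
  "https://basket-" ++ wbPad2 basket ++ ".wbbasket.ru/vol" ++ PySem.Int.toStr vol ++
    "/part" ++ PySem.Int.toStr part ++ "/" ++ PySem.Int.toStr nm ++ "/images/big/1.webp"

-- ===== PRECONDITION & SPEC =====
def Spec_wb_image_url_py (nm : Int) (out : String) : Prop := out = wb_image_url_py_alt nm
instance (nm : Int) (out : String) : Decidable (Spec_wb_image_url_py nm out) := by unfold Spec_wb_image_url_py; infer_instance

-- ===== CLAIM (what is proved, stated in full; the proofs are below) =====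
def Claim_equal_wb_image_url_py : Prop := ∀ (nm : Int), Dom_wb_image_url_py nm → Spec_wb_image_url_py nm (wb_image_url_py nm)

-- ===== LEMMAS AND PROOFS =====

-- A's scan equals B's padded bisect result, by the 18 regions of vol
theorem wbScan_eq (v : Int) :
    wbScanA v wbRangesA = wbPad2 ((wbBisect v 0 17 : Int) + 1) := by
  by_cases h1 : v ≤ 143
  · have e1 : wbScanA v wbRangesA = "01" := by simp [wbScanA, wbRangesA, h1]
    have f0 : ¬ ((1313 : Int) < v) := by omega
    have f1 : ¬ ((1007 : Int) < v) := by omega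
    have f2 : ¬ ((431 : Int) < v) := by omega
    have f3 : ¬ ((287 : Int) < v) := by omega
    have f4 : ¬ ((143 : Int) < v) := by omega
    have e2 : wbBisect v 0 17 = 0 := by simp [wbBisect, wbThresholdsB, f0, f1, f2, f3, f4]
    rw [e1, e2]; decide
  by_cases h2 : v ≤ 287
  · have e1 : wbScanA v wbRangesA = "02" := by simp [wbScanA, wbRangesA, h1, h2]
    have f0 : ¬ ((1313 : Int) < v) := by omega
    have f1 : ¬ ((1007 : Int) < v) := by omega
    have f2 : ¬ ((431 : Int) < v) := by omega
    have f3 : ¬ ((287 : Int) < v) := by omega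
    have f4 : (143 : Int) < v := by omega
    have e2 : wbBisect v 0 17 = 1 := by simp [wbBisect, wbThresholdsB, f0, f1, f2, f3, f4]
    rw [e1, e2]; decide
  by_cases h3 : v ≤ 431
  · have e1 : wbScanA v wbRangesA = "03" := by simp [wbScanA, wbRangesA, h1, h2, h3]
    have f0 : ¬ ((1313 : Int) < v) := by omega
    have f1 : ¬ ((1007 : Int) < v) := by omega
    have f2 : ¬ ((431 : Int) < v) := by omega
    have f3 : (287 : Int) < v := by omega
    have e2 : wbBisect v 0 17 = 2 := by simp [wbBisect, wbThresholdsB, f0, f1, f2, f3]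
    rw [e1, e2]; decide
  by_cases h4 : v ≤ 719
  · have e1 : wbScanA v wbRangesA = "04" := by simp [wbScanA, wbRangesA, h1, h2, h3, h4]
    have f0 : ¬ ((1313 : Int) < v) := by omega
    have f1 : ¬ ((1007 : Int) < v) := by omega
    have f2 : (431 : Int) < v := by omega
    have f3 : ¬ ((719 : Int) < v) := by omega
    have e2 : wbBisect v 0 17 = 3 := by simp [wbBisect, wbThresholdsB, f0, f1, f2, f3]
    rw [e1, e2]; decide
  by_cases h5 : v ≤ 1007
  · have e1 : wbScanA v wbRangesA = "05" := by simp [wbScanA, wbRangesA, h1, h2, h3, h4, h5]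
    have f0 : ¬ ((1313 : Int) < v) := by omega
    have f1 : ¬ ((1007 : Int) < v) := by omega
    have f2 : (431 : Int) < v := by omega
    have f3 : (719 : Int) < v := by omega
    have e2 : wbBisect v 0 17 = 4 := by simp [wbBisect, wbThresholdsB, f0, f1, f2, f3]
    rw [e1, e2]; decide
  by_cases h6 : v ≤ 1061
  · have e1 : wbScanA v wbRangesA = "06" := by simp [wbScanA, wbRangesA, h1, h2, h3, h4, h5, h6]
    have f0 : ¬ ((1313 : Int) < v) := by omega
    have f1 : (1007 : Int) < v := by omega
    have f2 : ¬ ((1115 : Int) < v) := by omega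
    have f3 : ¬ ((1061 : Int) < v) := by omega
    have e2 : wbBisect v 0 17 = 5 := by simp [wbBisect, wbThresholdsB, f0, f1, f2, f3]
    rw [e1, e2]; decide
  by_cases h7 : v ≤ 1115
  · have e1 : wbScanA v wbRangesA = "07" := by simp [wbScanA, wbRangesA, h1, h2, h3, h4, h5, h6, h7]
    have f0 : ¬ ((1313 : Int) < v) := by omega
    have f1 : (1007 : Int) < v := by omega
    have f2 : ¬ ((1115 : Int) < v) := by omega
    have f3 : (1061 : Int) < v := by omega
    have e2 : wbBisect v 0 17 = 6 := by simp [wbBisect, wbThresholdsB, f0, f1, f2, f3]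
    rw [e1, e2]; decide
  by_cases h8 : v ≤ 1169
  · have e1 : wbScanA v wbRangesA = "08" := by simp [wbScanA, wbRangesA, h1, h2, h3, h4, h5, h6, h7, h8]
    have f0 : ¬ ((1313 : Int) < v) := by omega
    have f1 : (1007 : Int) < v := by omega
    have f2 : (1115 : Int) < v := by omega
    have f3 : ¬ ((1169 : Int) < v) := by omega
    have e2 : wbBisect v 0 17 = 7 := by simp [wbBisect, wbThresholdsB, f0, f1, f2, f3]
    rw [e1, e2]; decide
  by_cases h9 : v ≤ 1313
  · have e1 : wbScanA v wbRangesA = "09" := by simp [wbScanA, wbRangesA, h1, h2, h3, h4, h5, h6, h7, h8, h9]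
    have f0 : ¬ ((1313 : Int) < v) := by omega
    have f1 : (1007 : Int) < v := by omega
    have f2 : (1115 : Int) < v := by omega
    have f3 : (1169 : Int) < v := by omega
    have e2 : wbBisect v 0 17 = 8 := by simp [wbBisect, wbThresholdsB, f0, f1, f2, f3]
    rw [e1, e2]; decide
  by_cases h10 : v ≤ 1601
  · have e1 : wbScanA v wbRangesA = "10" := by simp [wbScanA, wbRangesA, h1, h2, h3, h4, h5, h6, h7, h8, h9, h10]
    have f0 : (1313 : Int) < v := by omega
    have f1 : ¬ ((2189 : Int) < v) := by omega
    have f2 : ¬ ((1919 : Int) < v) := by omega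
    have f3 : ¬ ((1655 : Int) < v) := by omega
    have f4 : ¬ ((1601 : Int) < v) := by omega
    have e2 : wbBisect v 0 17 = 9 := by simp [wbBisect, wbThresholdsB, f0, f1, f2, f3, f4]
    rw [e1, e2]; decide
  by_cases h11 : v ≤ 1655
  · have e1 : wbScanA v wbRangesA = "11" := by simp [wbScanA, wbRangesA, h1, h2, h3, h4, h5, h6, h7, h8, h9, h10, h11]
    have f0 : (1313 : Int) < v := by omega
    have f1 : ¬ ((2189 : Int) < v) := by omega
    have f2 : ¬ ((1919 : Int) < v) := by omega
    have f3 : ¬ ((1655 : Int) < v) := by omega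
    have f4 : (1601 : Int) < v := by omega
    have e2 : wbBisect v 0 17 = 10 := by simp [wbBisect, wbThresholdsB, f0, f1, f2, f3, f4]
    rw [e1, e2]; decide
  by_cases h12 : v ≤ 1919
  · have e1 : wbScanA v wbRangesA = "12" := by simp [wbScanA, wbRangesA, h1, h2, h3, h4, h5, h6, h7, h8, h9, h10, h11, h12]
    have f0 : (1313 : Int) < v := by omega
    have f1 : ¬ ((2189 : Int) < v) := by omega
    have f2 : ¬ ((1919 : Int) < v) := by omega
    have f3 : (1655 : Int) < v := by omega
    have e2 : wbBisect v 0 17 = 11 := by simp [wbBisect, wbThresholdsB, f0, f1, f2, f3]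
    rw [e1, e2]; decide
  by_cases h13 : v ≤ 2045
  · have e1 : wbScanA v wbRangesA = "13" := by simp [wbScanA, wbRangesA, h1, h2, h3, h4, h5, h6, h7, h8, h9, h10, h11, h12, h13]
    have f0 : (1313 : Int) < v := by omega
    have f1 : ¬ ((2189 : Int) < v) := by omega
    have f2 : (1919 : Int) < v := by omega
    have f3 : ¬ ((2045 : Int) < v) := by omega
    have e2 : wbBisect v 0 17 = 12 := by simp [wbBisect, wbThresholdsB, f0, f1, f2, f3]
    rw [e1, e2]; decide
  by_cases h14 : v ≤ 2189
  · have e1 : wbScanA v wbRangesA = "14" := by simp [wbScanA, wbRangesA, h1, h2, h3, h4, h5, h6, h7, h8, h9, h10, h11, h12, h13, h14]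
    have f0 : (1313 : Int) < v := by omega
    have f1 : ¬ ((2189 : Int) < v) := by omega
    have f2 : (1919 : Int) < v := by omega
    have f3 : (2045 : Int) < v := by omega
    have e2 : wbBisect v 0 17 = 13 := by simp [wbBisect, wbThresholdsB, f0, f1, f2, f3]
    rw [e1, e2]; decide
  by_cases h15 : v ≤ 2405
  · have e1 : wbScanA v wbRangesA = "15" := by simp [wbScanA, wbRangesA, h1, h2, h3, h4, h5, h6, h7, h8, h9, h10, h11, h12, h13, h14, h15]
    have f0 : (1313 : Int) < v := by omega
    have f1 : (2189 : Int) < v := by omega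
    have f2 : ¬ ((2621 : Int) < v) := by omega
    have f3 : ¬ ((2405 : Int) < v) := by omega
    have e2 : wbBisect v 0 17 = 14 := by simp [wbBisect, wbThresholdsB, f0, f1, f2, f3]
    rw [e1, e2]; decide
  by_cases h16 : v ≤ 2621
  · have e1 : wbScanA v wbRangesA = "16" := by simp [wbScanA, wbRangesA, h1, h2, h3, h4, h5, h6, h7, h8, h9, h10, h11, h12, h13, h14, h15, h16]
    have f0 : (1313 : Int) < v := by omega
    have f1 : (2189 : Int) < v := by omega
    have f2 : ¬ ((2621 : Int) < v) := by omega
    have f3 : (2405 : Int) < v := by omega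
    have e2 : wbBisect v 0 17 = 15 := by simp [wbBisect, wbThresholdsB, f0, f1, f2, f3]
    rw [e1, e2]; decide
  by_cases h17 : v ≤ 2837
  · have e1 : wbScanA v wbRangesA = "17" := by simp [wbScanA, wbRangesA, h1, h2, h3, h4, h5, h6, h7, h8, h9, h10, h11, h12, h13, h14, h15, h16, h17]
    have f0 : (1313 : Int) < v := by omega
    have f1 : (2189 : Int) < v := by omega
    have f2 : (2621 : Int) < v := by omega
    have f3 : ¬ ((2837 : Int) < v) := by omega
    have e2 : wbBisect v 0 17 = 16 := by simp [wbBisect, wbThresholdsB, f0, f1, f2, f3]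
    rw [e1, e2]; decide
  · have e1 : wbScanA v wbRangesA = "18" := by simp [wbScanA, wbRangesA, h1, h2, h3, h4, h5, h6, h7, h8, h9, h10, h11, h12, h13, h14, h15, h16, h17]
    have f0 : (1313 : Int) < v := by omega
    have f1 : (2189 : Int) < v := by omega
    have f2 : (2621 : Int) < v := by omega
    have f3 : (2837 : Int) < v := by omega
    have e2 : wbBisect v 0 17 = 17 := by simp [wbBisect, wbThresholdsB, f0, f1, f2, f3]
    rw [e1, e2]; decide

-- ===== VERDICT (by name: the statement is the Claim_ definition above) =====
theorem wb_image_url_py_spec : Claim_equal_wb_image_url_py := by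
  intro nm _
  show _ = _
  simp only [wb_image_url_py, wb_image_url_py_alt]
  rw [show wbThresholdsB.length = 17 from rfl, wbScan_eq]
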